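-- pv_equiv track=rewrite | github.com/Yakumo625/algorithm | 4_Math/acwing 868. 筛质数.py | func
-- ===== SOURCE A (Python) =====
-- def func(n):
--     res = 0
--     primes, is_prime = [], [1 for _ in range(n + 1)]
--     for i in range(2, n + 1):
--         if is_prime[i]:
--             res += 1
--             primes.append(i)
--         for j in range(len(primes)):
--             c = primes[j] * i
--             if c > n: break
--             is_prime[c] = 0
--             if i % primes[j] == 0: break
--     return set([prime for prime in primes if prime & 1])
-- ===== SOURCE B (Python) =====
-- def func(n):
--     comp = [False] * (n + 1)
--     for i in range(2, n + 1):
--         for j in range(2 * i, n + 1, i):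
--             comp[j] = True
--     return {i for i in range(3, n + 1, 2) if not comp[i]}
-- ===== Notes on version B (the rewrite author's own statement) =====
-- stated objective: alternative
-- what changed: Replaces the linear (Euler) sieve that tracks a primes list and breaks on the smallest prime factor with a plain Sieve of Eratosthenes that marks every proper multiple of every candidate and then collects the unmarked odd numbers.
import Mathlib
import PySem

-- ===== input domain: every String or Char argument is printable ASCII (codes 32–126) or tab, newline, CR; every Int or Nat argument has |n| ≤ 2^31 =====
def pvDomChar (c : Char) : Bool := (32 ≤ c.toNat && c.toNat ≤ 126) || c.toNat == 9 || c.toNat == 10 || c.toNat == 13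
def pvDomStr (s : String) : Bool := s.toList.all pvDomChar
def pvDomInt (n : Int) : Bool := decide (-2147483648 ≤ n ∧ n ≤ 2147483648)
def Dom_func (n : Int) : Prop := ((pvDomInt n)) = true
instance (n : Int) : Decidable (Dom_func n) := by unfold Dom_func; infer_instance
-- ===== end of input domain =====

-- B replaces A's linear (Euler) sieve with a plain Sieve of Eratosthenes: a genuinely
-- different marking strategy of similar cost (objective: alternative).

-- ===== PORT A =====
-- inner loop: for j in range(len(primes)): c = primes[j]*i; break on c > n; is_prime[c] = 0; break if i % primes[j] == 0
def funcInner (n i : Int) (ps : List Int) (isp : List Int) : List Int :=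
  match ps with
  | [] => isp
  | p :: rest =>
    let c := p * i
    if c > n then isp
    else
      let isp' := PySem.List.pySetD isp c 0
      if PySem.Int.mod i p = 0 then isp' else funcInner n i rest isp'

def func (n : Int) : List Int :=
  let st := (PySem.List.pyRange 2 (n + 1) 1).foldl
    (fun (st : Int × List Int × List Int) i =>
      let res := st.1
      let primes := st.2.1
      let isp := st.2.2
      let resPrimes :=
        if PySem.List.pyGetD isp i 0 ≠ 0 then (res + 1, primes ++ [i]) else (res, primes)
      (resPrimes.1, resPrimes.2, funcInner n i resPrimes.2 isp))
    (0, ([] : List Int), (PySem.List.pyRange 0 (n + 1) 1).map (fun _ => (1 : Int)))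
  PySem.Set.ofList (st.2.1.filter (fun p => PySem.Int.band p 1 ≠ 0))

-- ===== PORT B =====
def func_alt (n : Int) : List Int :=
  let comp := (PySem.List.pyRange 2 (n + 1) 1).foldl
    (fun comp i =>
      (PySem.List.pyRange (2 * i) (n + 1) i).foldl
        (fun comp j => PySem.List.pySetD comp j true) comp)
    (List.replicate (n + 1).toNat false)
  PySem.Set.ofList ((PySem.List.pyRange 3 (n + 1) 2).filter
    (fun i => !(PySem.List.pyGetD comp i false)))

-- ===== PRECONDITION & SPEC =====
def Spec_func (n : Int) (out : List Int) : Prop := out = func_alt n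
instance (n : Int) (out : List Int) : Decidable (Spec_func n out) := by unfold Spec_func; infer_instance

-- ===== CLAIM (what is proved, stated in full; the proofs are below) =====
def Claim_equal_func : Prop := ∀ (n : Int), Dom_func n → Spec_func n (func n)

-- ===== LEMMAS AND PROOFS =====

-- the canonical result: odd primes up to N, ascending, as Ints
def canonP (N : Nat) : List Int :=
  (((List.range (N + 1)).filter (fun p => decide (Nat.Prime p))).filter
    (fun p => decide (p % 2 = 1))).map (fun (p : Nat) => (p : Int))

theorem getD_set_eq {α : Type} (l : List α) (a : Nat) (v : α) (ha : a < l.length)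
    (x : Nat) (d : α) : (l.set a v).getD x d = if x = a then v else l.getD x d := by
  by_cases hx : x = a
  · subst hx
    rw [List.getD_eq_getElem?_getD, List.getElem?_set_self (by omega)]
    simp
  · rw [List.getD_eq_getElem?_getD, List.getElem?_set_ne (by omega), ← List.getD_eq_getElem?_getD]
    simp [hx]

-- two strictly increasing Int lists with the same members are equal
theorem eq_of_sorted_lt_mem {l1 l2 : List Int} (h1 : l1.Pairwise (· < ·))
    (h2 : l2.Pairwise (· < ·)) (hm : ∀ v, v ∈ l1 ↔ v ∈ l2) : l1 = l2 := by
  have hp : l1.Perm l2 :=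
    (List.perm_ext_iff_of_nodup (h1.imp ne_of_lt) (h2.imp ne_of_lt)).mpr hm
  exact hp.eq_of_pairwise (fun a b _ _ hab hba => absurd hba (lt_asymm hab)) h1 h2

-- ========== A side: the linear sieve ==========

def stepA (n : Int) (st : Int × List Int × List Int) (i : Int) : Int × List Int × List Int :=
  let res := st.1
  let primes := st.2.1
  let isp := st.2.2
  let resPrimes :=
    if PySem.List.pyGetD isp i 0 ≠ 0 then (res + 1, primes ++ [i]) else (res, primes)
  (resPrimes.1, resPrimes.2, funcInner n i resPrimes.2 isp)

theorem func_eq (n : Int) :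
    func n = PySem.Set.ofList
      (((PySem.List.pyRange 2 (n + 1) 1).foldl (stepA n)
          (0, ([] : List Int), (PySem.List.pyRange 0 (n + 1) 1).map (fun _ => (1 : Int)))).2.1.filter
        (fun p => decide (PySem.Int.band p 1 ≠ 0))) := rfl

-- x has been struck out after the outer loop has processed i = 2 .. m-1
def MarkedA (N m x : Nat) : Prop :=
  ∃ p k, Nat.Prime p ∧ 2 ≤ k ∧ k < m ∧ p ≤ k.minFac ∧ x = p * k ∧ x ≤ N

theorem markedA_self {N i : Nat} (h2 : 2 ≤ i) (hN : i ≤ N) : MarkedA N i i ↔ ¬ i.Prime := by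
  constructor
  · rintro ⟨p, k, hp, hk2, hki, hpmf, heq, -⟩ hprime
    rcases hprime.eq_one_or_self_of_dvd p ⟨k, heq⟩ with h1 | h1
    · exact absurd h1 hp.one_lt.ne'
    · subst h1; nlinarith [hp.two_le]
  · intro hnp
    have hp : Nat.Prime i.minFac := Nat.minFac_prime (by omega)
    have hd : i.minFac ∣ i := Nat.minFac_dvd i
    have hk : i.minFac * (i / i.minFac) = i := Nat.mul_div_cancel' hd
    have hk0 : i / i.minFac ≠ 0 := by rintro h; rw [h, Nat.mul_zero] at hk; omega
    have hk1 : i / i.minFac ≠ 1 := by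
      rintro h; rw [h, Nat.mul_one] at hk; exact hnp (hk ▸ hp)
    have hq : Nat.Prime (i / i.minFac).minFac := Nat.minFac_prime (by omega)
    refine ⟨i.minFac, i / i.minFac, hp, (Nat.two_le_iff _).mpr ⟨hk0, hk1⟩, ?_, ?_, hk.symm, hN⟩
    · exact Nat.div_lt_self (by omega) hp.one_lt
    · refine Nat.minFac_le_of_dvd hq.two_le ?_
      exact dvd_trans (Nat.minFac_dvd _) (Dvd.intro_left _ hk)

def toInts (qs : List Nat) : List Int := qs.map (fun (q : Nat) => (q : Int))

theorem funcInner_spec (N I : Nat) (_hI : 2 ≤ I) :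
    ∀ (qs : List Nat) (isp : List Int), qs.Pairwise (· < ·) → (∀ q ∈ qs, Nat.Prime q) →
    I.minFac ∈ qs → isp.length = N + 1 →
    (funcInner (N : Int) (I : Int) (toInts qs) isp).length = N + 1 ∧
    ∀ x, x ≤ N →
      ((funcInner (N : Int) (I : Int) (toInts qs) isp).getD x 0 = 0 ↔
        ((∃ q ∈ qs, q ≤ I.minFac ∧ q * I ≤ N ∧ x = q * I) ∨ isp.getD x 0 = 0)) := by
  intro qs
  induction qs with
  | nil => intro isp _ _ hmf _; simp at hmf
  | cons q rest IH =>
    intro isp hsort hprime hmf hlen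
    have hq : Nat.Prime q := hprime q (by simp)
    have hrest_lt : ∀ r ∈ rest, q < r := fun r hr => (List.pairwise_cons.mp hsort).1 r hr
    rw [show toInts (q :: rest) = (q : Int) :: toInts rest from rfl]
    simp only [funcInner]
    by_cases htop : ((N : Int) < (q : Int) * (I : Int))
    · rw [if_pos (by exact_mod_cast htop)]
      have hqi : N < q * I := by exact_mod_cast htop
      refine ⟨hlen, fun x hx => ?_⟩
      constructor
      · exact fun h => Or.inr h
      · rintro (⟨q', hq', hmf', hN', hx'⟩ | h)
        · rcases List.mem_cons.mp hq' with rfl | hq'r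
          · omega
          · have h1 := hrest_lt q' hq'r
            have h2 : q * I ≤ q' * I := Nat.mul_le_mul_right I (by omega)
            omega
        · exact h
    · rw [if_neg (by exact_mod_cast htop)]
      have hle : q * I ≤ N := by
        have := not_lt.mp htop; exact_mod_cast this
      have hcast : ((q : Int) * (I : Int)) = ((q * I : Nat) : Int) := by push_cast; ring
      have hset : PySem.List.pySetD isp ((q : Int) * (I : Int)) 0 = isp.set (q * I) 0 := by
        rw [hcast, PySem.List.pySetD_natCast]
      have hlt : q * I < isp.length := by omega
      have hlen' : (isp.set (q * I) 0).length = N + 1 := by rw [List.length_set]; exact hlen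
      have hgetD' : ∀ x : Nat, (isp.set (q * I) 0).getD x 0 =
          if x = q * I then 0 else isp.getD x 0 := fun x => getD_set_eq _ _ _ hlt x 0
      rw [hset]
      by_cases hdvd : PySem.Int.mod (I : Int) (q : Int) = 0
      · rw [if_pos hdvd]
        have hqdvd : q ∣ I := by
          rw [PySem.Int.mod_natCast] at hdvd
          exact Nat.dvd_of_mod_eq_zero (by exact_mod_cast hdvd)
        have hqmf : q = I.minFac := by
          have h1 : I.minFac ≤ q := Nat.minFac_le_of_dvd hq.two_le hqdvd
          rcases List.mem_cons.mp hmf with h | h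
          · omega
          · have := hrest_lt _ h; omega
        refine ⟨hlen', fun x hx => ?_⟩
        rw [hgetD' x]
        by_cases hxe : x = q * I
        · rw [if_pos hxe]
          constructor
          · exact fun _ => Or.inl ⟨q, by simp, le_of_eq hqmf, hle, hxe⟩
          · exact fun _ => rfl
        · rw [if_neg hxe]
          constructor
          · exact fun h => Or.inr h
          · rintro (⟨q', hq', hle', hN', hx'⟩ | h)
            · rcases List.mem_cons.mp hq' with rfl | hq'r
              · exact absurd hx' hxe
              · have := hrest_lt _ hq'r; omega
            · exact h
      · rw [if_neg hdvd]
        have hqndvd : ¬ q ∣ I := by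
          intro hd
          apply hdvd
          rw [PySem.Int.mod_natCast]
          have h0 : I % q = 0 := Nat.mod_eq_zero_of_dvd hd
          rw [h0]; rfl
        have hmfrest : I.minFac ∈ rest := by
          rcases List.mem_cons.mp hmf with h | h
          · exact absurd (h ▸ Nat.minFac_dvd I) hqndvd
          · exact h
        have hqlt : q < I.minFac := hrest_lt _ hmfrest
        obtain ⟨ihlen, ihget⟩ := IH (isp.set (q * I) 0) (List.pairwise_cons.mp hsort).2
          (fun r hr => hprime r (List.mem_cons_of_mem _ hr)) hmfrest hlen'
        refine ⟨ihlen, fun x hx => ?_⟩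
        rw [ihget x hx]
        constructor
        · rintro (⟨q', hq', h1, h2, h3⟩ | h)
          · exact Or.inl ⟨q', List.mem_cons_of_mem _ hq', h1, h2, h3⟩
          · rw [hgetD' x] at h
            by_cases hxe : x = q * I
            · exact Or.inl ⟨q, by simp, by omega, hle, hxe⟩
            · rw [if_neg hxe] at h; exact Or.inr h
        · rintro (⟨q', hq', h1, h2, h3⟩ | h)
          · rcases List.mem_cons.mp hq' with rfl | hq'r
            · exact Or.inr (by rw [hgetD' x, if_pos h3])
            · exact Or.inl ⟨q', hq'r, h1, h2, h3⟩
          · refine Or.inr ?_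
            rw [hgetD' x]
            by_cases hxe : x = q * I
            · rw [if_pos hxe]
            · rw [if_neg hxe]; exact h
  

def AInv (N m : Nat) (st : Int × List Int × List Int) : Prop :=
  st.2.1 = toInts ((List.range m).filter (fun p => decide (Nat.Prime p))) ∧
  st.2.2.length = N + 1 ∧
  ∀ x, x ≤ N → (st.2.2.getD x 0 = 0 ↔ MarkedA N m x)

theorem markedA_succ {N m x : Nat} (h2 : 2 ≤ m) :
    MarkedA N (m + 1) x ↔
      ((∃ q ∈ (List.range (m + 1)).filter (fun p => decide (Nat.Prime p)),
          q ≤ m.minFac ∧ q * m ≤ N ∧ x = q * m) ∨ MarkedA N m x) := by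
  constructor
  · rintro ⟨p, k, hp, hk2, hki, hpmf, heq, hxN⟩
    by_cases hkm : k = m
    · subst hkm
      refine Or.inl ⟨p, ?_, hpmf, by omega, heq⟩
      have : p ≤ k := le_trans hpmf (Nat.minFac_le (by omega))
      simp [List.mem_filter, List.mem_range, hp]
      omega
    · exact Or.inr ⟨p, k, hp, hk2, by omega, hpmf, heq, hxN⟩
  · rintro (⟨q, hqmem, hqmf, hqN, heq⟩ | ⟨p, k, hp, hk2, hki, hpmf, heq, hxN⟩)
    · rw [List.mem_filter, List.mem_range] at hqmem
      exact ⟨q, m, by simpa using hqmem.2, h2, by omega, hqmf, heq, by omega⟩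
    · exact ⟨p, k, hp, hk2, by omega, hpmf, heq, hxN⟩

theorem foldA (N : Nat) : ∀ m, 2 ≤ m → m ≤ N + 1 →
    AInv N m ((PySem.List.pyRange 2 (m : Int) 1).foldl (stepA (N : Int))
      (0, ([] : List Int), (PySem.List.pyRange 0 ((N : Int) + 1) 1).map (fun _ => (1 : Int)))) := by
  intro m
  induction m with
  | zero => omega
  | succ m IH =>
    intro h2 hle
    rcases Nat.lt_or_ge m 2 with hm | hm
    · -- base case m + 1 = 2
      have hm1 : m = 1 := by omega
      subst hm1
      rw [show PySem.List.pyRange 2 ((1 + 1 : Nat) : Int) 1 = [] from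
        PySem.List.pyRange_one_eq_nil (by norm_num)]
      rw [List.foldl_nil]
      refine ⟨?_, ?_, ?_⟩
      · show ([] : List Int) = _
        decide
      · rw [List.length_map, PySem.List.length_pyRange_one]; omega
      · intro x hx
        have hxlt : x < ((PySem.List.pyRange 0 ((N : Int) + 1) 1).map
            (fun _ => (1 : Int))).length := by
          rw [List.length_map, PySem.List.length_pyRange_one]; omega
        rw [List.getD_eq_getElem _ _ hxlt, List.getElem_map]
        constructor
        · intro h; exact absurd h one_ne_zero
        · rintro ⟨p, k, -, hk2, hkm, -⟩; omega
    · -- inductive step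
      have hmN : m ≤ N := by omega
      obtain ⟨hprimes, hlen, hget⟩ := IH hm (by omega)
      rw [show ((m + 1 : Nat) : Int) = (m : Int) + 1 by push_cast; ring]
      have hsucc : PySem.List.pyRange 2 ((m : Int) + 1) 1 =
          PySem.List.pyRange 2 (m : Int) 1 ++ [(m : Int)] :=
        PySem.List.pyRange_one_succ_right (by exact_mod_cast hm)
      rw [hsucc, List.foldl_append, List.foldl_cons, List.foldl_nil]
      set st := (PySem.List.pyRange 2 (m : Int) 1).foldl (stepA (N : Int))
        (0, ([] : List Int), (PySem.List.pyRange 0 ((N : Int) + 1) 1).map (fun _ => (1 : Int)))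
        with hst
      obtain ⟨hprimes, hlen, hget⟩ := IH hm (by omega)
      have hread : PySem.List.pyGetD st.2.2 (m : Int) 0 = st.2.2.getD m 0 :=
        PySem.List.pyGetD_natCast _ _ _
      have hqs : (List.range (m + 1)).filter (fun p => decide (Nat.Prime p)) =
          (List.range m).filter (fun p => decide (Nat.Prime p)) ++
            (if Nat.Prime m then [m] else []) := by
        rw [List.range_succ, List.filter_append]
        congr 1
        by_cases h : Nat.Prime m <;> simp [h]
      have hsorted : ((List.range (m + 1)).filter
          (fun p => decide (Nat.Prime p))).Pairwise (· < ·) :=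
        List.Pairwise.filter _ List.pairwise_lt_range
      have hallprime : ∀ q ∈ (List.range (m + 1)).filter (fun p => decide (Nat.Prime p)),
          Nat.Prime q := fun q hq => of_decide_eq_true (List.mem_filter.mp hq).2
      have hmfmem : m.minFac ∈ (List.range (m + 1)).filter (fun p => decide (Nat.Prime p)) :=
        List.mem_filter.mpr ⟨List.mem_range.mpr
          (by have := Nat.minFac_le (show 0 < m by omega); omega),
          decide_eq_true (Nat.minFac_prime (by omega))⟩
      obtain ⟨ilen, iget⟩ := funcInner_spec N m hm _ st.2.2 hsorted hallprime hmfmem hlen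
      simp only [stepA]
      by_cases hpm : Nat.Prime m
      · have hcond : PySem.List.pyGetD st.2.2 (m : Int) 0 ≠ 0 := by
          rw [hread]
          intro h
          exact (markedA_self hm hmN).mp ((hget m hmN).mp h) hpm
        rw [if_pos hcond]
        have hp2 : st.2.1 ++ [(m : Int)] =
            toInts ((List.range (m + 1)).filter (fun p => decide (Nat.Prime p))) := by
          rw [hprimes, hqs]; simp [toInts, hpm]
        refine ⟨hp2, ?_, ?_⟩
        · show (funcInner (N : Int) (m : Int) (st.2.1 ++ [(m : Int)]) st.2.2).length = N + 1
          rw [hp2]; exact ilen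
        · intro x hx
          show (funcInner (N : Int) (m : Int) (st.2.1 ++ [(m : Int)]) st.2.2).getD x 0 = 0 ↔ _
          rw [hp2, iget x hx, hget x hx]
          exact (markedA_succ hm).symm
      · have h0 : st.2.2.getD m 0 = 0 :=
          (hget m hmN).mpr ((markedA_self hm hmN).mpr hpm)
        have hcond : ¬ (PySem.List.pyGetD st.2.2 (m : Int) 0 ≠ 0) := by
          rw [hread, h0]; simp
        rw [if_neg hcond]
        have hp2 : st.2.1 =
            toInts ((List.range (m + 1)).filter (fun p => decide (Nat.Prime p))) := by
          rw [hprimes, hqs]; simp [toInts, hpm]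
        refine ⟨hp2, ?_, ?_⟩
        · show (funcInner (N : Int) (m : Int) st.2.1 st.2.2).length = N + 1
          rw [hp2]; exact ilen
        · intro x hx
          show (funcInner (N : Int) (m : Int) st.2.1 st.2.2).getD x 0 = 0 ↔ _
          rw [hp2, iget x hx, hget x hx]
          exact (markedA_succ hm).symm
  

theorem funcA_canon (N : Nat) (h2 : 2 ≤ N) : func (N : Int) = canonP N := by
  rw [func_eq]
  have h := foldA N (N + 1) (by omega) (le_refl _)
  rw [show ((N + 1 : Nat) : Int) = (N : Int) + 1 by push_cast; ring] at h
  obtain ⟨hprimes, -, -⟩ := h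
  rw [hprimes]
  have hband : ∀ p : Nat, PySem.Int.band ((p : Nat) : Int) 1 = ((p % 2 : Nat) : Int) := by
    intro p
    have h := PySem.Int.band_natCast p 1
    rw [show ((1 : Nat) : Int) = (1 : Int) from rfl] at h
    rw [h, Nat.and_one_is_mod]
  unfold toInts
  rw [List.filter_map]
  have hfil : List.filter
      ((fun p : Int => decide (PySem.Int.band p 1 ≠ 0)) ∘ (fun q : Nat => (q : Int)))
      ((List.range (N + 1)).filter (fun p => decide (Nat.Prime p))) =
      ((List.range (N + 1)).filter (fun p => decide (Nat.Prime p))).filter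
        (fun p => decide (p % 2 = 1)) := by
    apply List.filter_congr
    intro p _
    simp only [Function.comp_apply]
    rw [hband p]
    rcases Nat.mod_two_eq_zero_or_one p with h | h <;> simp [h]
  rw [hfil]
  exact PySem.Set.ofList_eq_self_of_nodup _
    (((List.nodup_range.filter _).filter _).map Nat.cast_injective)

-- ========== B side: the Sieve of Eratosthenes ==========

def stepB (n : Int) (comp : List Bool) (i : Int) : List Bool :=
  (PySem.List.pyRange (2 * i) (n + 1) i).foldl
    (fun comp j => PySem.List.pySetD comp j true) comp

theorem func_alt_eq (n : Int) :
    func_alt n = PySem.Set.ofList ((PySem.List.pyRange 3 (n + 1) 2).filter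
      (fun i => !(PySem.List.pyGetD
        ((PySem.List.pyRange 2 (n + 1) 1).foldl (stepB n)
          (List.replicate (n + 1).toNat false)) i false))) := rfl

def CompM (N m x : Nat) : Prop :=
  ∃ i k, 2 ≤ i ∧ i < m ∧ 2 ≤ k ∧ x = k * i ∧ x ≤ N

theorem foldSet_spec : ∀ (js : List Int) (A : List Bool),
    (∀ j ∈ js, 0 ≤ j ∧ j < (A.length : Int)) →
    (js.foldl (fun a j => PySem.List.pySetD a j true) A).length = A.length ∧
    ∀ x : Nat, ((js.foldl (fun a j => PySem.List.pySetD a j true) A).getD x false = true ↔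
      ((x : Int) ∈ js ∨ A.getD x false = true)) := by
  intro js
  induction js with
  | nil => intro A _; exact ⟨rfl, fun x => by simp⟩
  | cons j rest IH =>
    intro A hb
    obtain ⟨hj0, hjlt⟩ := hb j (by simp)
    rw [List.foldl_cons, PySem.List.pySetD_of_nonneg _ _ hj0]
    have hlen' : (A.set j.toNat true).length = A.length := List.length_set ..
    obtain ⟨ihlen, ihget⟩ := IH (A.set j.toNat true)
      (fun r hr => by rw [hlen']; exact hb r (List.mem_cons_of_mem _ hr))
    refine ⟨by rw [ihlen, hlen'], fun x => ?_⟩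
    rw [ihget x]
    have hjn : j.toNat < A.length := by omega
    rw [getD_set_eq _ _ _ hjn x false]
    by_cases hxj : (x : Int) = j
    · have hx : x = j.toNat := by omega
      constructor
      · intro _; exact Or.inl (List.mem_cons.mpr (Or.inl hxj))
      · intro _; right; rw [if_pos hx]
    · have hne : x ≠ j.toNat := by omega
      simp [List.mem_cons, hxj, hne]

def BInv (N m : Nat) (comp : List Bool) : Prop :=
  comp.length = N + 1 ∧ ∀ x, x ≤ N → (comp.getD x false = true ↔ CompM N m x)

theorem foldB (N : Nat) : ∀ m, 2 ≤ m → m ≤ N + 1 →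
    BInv N m ((PySem.List.pyRange 2 (m : Int) 1).foldl (stepB (N : Int))
      (List.replicate (((N : Int) + 1)).toNat false)) := by
  intro m
  induction m with
  | zero => omega
  | succ m IH =>
    intro h2 hle
    rcases Nat.lt_or_ge m 2 with hm | hm
    · have hm1 : m = 1 := by omega
      subst hm1
      rw [show PySem.List.pyRange 2 ((1 + 1 : Nat) : Int) 1 = [] from
        PySem.List.pyRange_one_eq_nil (by norm_num)]
      rw [List.foldl_nil]
      constructor
      · rw [List.length_replicate]; omega
      · intro x hx
        rw [List.getD_replicate _ (by omega)]
        constructor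
        · intro h; exact absurd h Bool.false_ne_true
        · rintro ⟨i, k, hi2, him, -⟩; omega
    · have hmN : m ≤ N := by omega
      obtain ⟨hlen, hget⟩ := IH hm (by omega)
      rw [show ((m + 1 : Nat) : Int) = (m : Int) + 1 by push_cast; ring]
      have hsucc : PySem.List.pyRange 2 ((m : Int) + 1) 1 =
          PySem.List.pyRange 2 (m : Int) 1 ++ [(m : Int)] :=
        PySem.List.pyRange_one_succ_right (by exact_mod_cast hm)
      rw [hsucc, List.foldl_append, List.foldl_cons, List.foldl_nil]
      set st := (PySem.List.pyRange 2 (m : Int) 1).foldl (stepB (N : Int))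
        (List.replicate (((N : Int) + 1)).toNat false) with hst
      simp only [stepB]
      have hpos : (0 : Int) < (m : Int) := by exact_mod_cast (show 0 < m by omega)
      have hbounds : ∀ j ∈ PySem.List.pyRange (2 * (m : Int)) ((N : Int) + 1) (m : Int),
          0 ≤ j ∧ j < (st.length : Int) := by
        intro j hj
        rw [PySem.List.mem_pyRange_iff_of_pos hpos] at hj
        obtain ⟨h1, h2', -⟩ := hj
        rw [hlen]
        push_cast
        omega
      obtain ⟨flen, fget⟩ := foldSet_spec _ _ hbounds
      refine ⟨by rw [flen, hlen], ?_⟩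
      intro x hx
      rw [fget x]
      have hmem : (x : Int) ∈ PySem.List.pyRange (2 * (m : Int)) ((N : Int) + 1) (m : Int) ↔
          ∃ k, 2 ≤ k ∧ x = k * m ∧ x ≤ N := by
        rw [PySem.List.mem_pyRange_iff_of_pos hpos]
        constructor
        · rintro ⟨h1, h2', t, ht⟩
          have ht0 : 0 ≤ t := by
            by_contra hneg
            have : (m : Int) * t < 0 := mul_neg_of_pos_of_neg hpos (by omega)
            omega
          have hxi : (x : Int) = (m : Int) * (t + 2) := by rw [mul_add]; omega
          refine ⟨(t + 2).toNat, by omega, ?_, by omega⟩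
          have hk : (((t + 2).toNat : Nat) : Int) = t + 2 := Int.toNat_of_nonneg (by omega)
          have hcast : ((x : Nat) : Int) = (((t + 2).toNat * m : Nat) : Int) := by
            push_cast
            rw [hk]
            linarith [hxi]
          exact_mod_cast hcast
        · rintro ⟨k, hk2, rfl, hxN⟩
          have h2m : 2 * m ≤ k * m := Nat.mul_le_mul_right m hk2
          refine ⟨by exact_mod_cast h2m, by exact_mod_cast Nat.lt_succ_of_le hxN,
            ⟨(k : Int) - 2, by push_cast; ring⟩⟩
      rw [hmem, hget x hx]
      constructor
      · rintro (⟨k, hk2, hxe, hxN⟩ | ⟨i, k, hi2, him, hk2, hxe, hxN⟩)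
        · exact ⟨m, k, by omega, by omega, hk2, hxe, hxN⟩
        · exact ⟨i, k, hi2, by omega, hk2, hxe, hxN⟩
      · rintro ⟨i, k, hi2, him, hk2, hxe, hxN⟩
        by_cases he : i = m
        · subst he; exact Or.inl ⟨k, hk2, hxe, hxN⟩
        · exact Or.inr ⟨i, k, hi2, by omega, hk2, hxe, hxN⟩

theorem compM_full {N x : Nat} (h2 : 2 ≤ x) (hN : x ≤ N) : CompM N (N + 1) x ↔ ¬ x.Prime := by
  constructor
  · rintro ⟨i, k, hi2, him, hk2, heq, -⟩ hprime
    rcases hprime.eq_one_or_self_of_dvd i ⟨k, by rw [heq, Nat.mul_comm]⟩ with h1 | h1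
    · omega
    · subst h1; nlinarith
  · intro hnp
    have hp : Nat.Prime x.minFac := Nat.minFac_prime (by omega)
    have hd : x.minFac ∣ x := Nat.minFac_dvd x
    have hk : x.minFac * (x / x.minFac) = x := Nat.mul_div_cancel' hd
    have hk0 : x / x.minFac ≠ 0 := by rintro h; rw [h, Nat.mul_zero] at hk; omega
    have hk1 : x / x.minFac ≠ 1 := by
      rintro h; rw [h, Nat.mul_one] at hk; exact hnp (hk ▸ hp)
    have hle : x.minFac ≤ x := Nat.minFac_le (by omega)
    exact ⟨x.minFac, x / x.minFac, hp.two_le, by omega, (Nat.two_le_iff _).mpr ⟨hk0, hk1⟩, by rw [Nat.mul_comm]; exact hk.symm, hN⟩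

theorem funcB_canon (N : Nat) (h2 : 2 ≤ N) : func_alt (N : Int) = canonP N := by
  rw [func_alt_eq]
  have h := foldB N (N + 1) (by omega) (le_refl _)
  rw [show ((N + 1 : Nat) : Int) = (N : Int) + 1 by push_cast; ring] at h
  set comp := (PySem.List.pyRange 2 ((N : Int) + 1) 1).foldl (stepB ((N : Int)))
    (List.replicate (((N : Int) + 1)).toNat false) with hcomp
  obtain ⟨hlen, hget⟩ := h
  have hcanon_sorted : (canonP N).Pairwise (· < ·) :=
    List.pairwise_map.mpr ((List.Pairwise.filter _
      (List.Pairwise.filter _ List.pairwise_lt_range)).imp (fun h => by exact_mod_cast h))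
  have hcanon_mem : ∀ v : Int, v ∈ canonP N ↔
      ∃ p : Nat, p ≤ N ∧ Nat.Prime p ∧ p % 2 = 1 ∧ v = (p : Int) := by
    intro v
    unfold canonP
    simp only [List.mem_map, List.mem_filter, List.mem_range]
    constructor
    · rintro ⟨p, ⟨⟨hpr, hprime⟩, hodd⟩, rfl⟩
      exact ⟨p, by omega, of_decide_eq_true hprime, of_decide_eq_true hodd, rfl⟩
    · rintro ⟨p, hpN, hprime, hodd, rfl⟩
      exact ⟨p, ⟨⟨by omega, decide_eq_true hprime⟩, decide_eq_true hodd⟩, rfl⟩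
  have hL : (PySem.List.pyRange 3 ((N : Int) + 1) 2).filter
      (fun i => !(PySem.List.pyGetD comp i false)) = canonP N := by
    refine eq_of_sorted_lt_mem ?_ hcanon_sorted ?_
    · apply List.Pairwise.filter
      rw [PySem.List.pyRange_of_pos _ _ (by norm_num)]
      exact List.pairwise_map.mpr (List.pairwise_lt_range.imp (fun h => by omega))
    · intro v
      rw [hcanon_mem v, List.mem_filter]
      constructor
      · rintro ⟨hmem, hpred⟩
        rw [PySem.List.mem_pyRange_iff_of_pos (by norm_num)] at hmem
        obtain ⟨h3, hlt, hdvd⟩ := hmem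
        have h0 : 0 ≤ v := by omega
        have hv : v = ((v.toNat : Nat) : Int) := (Int.toNat_of_nonneg h0).symm
        set p := v.toNat with hp
        have hpN : p ≤ N := by omega
        rw [hv, PySem.List.pyGetD_natCast] at hpred
        have hcompf : comp.getD p false = false := by simpa using hpred
        have hnc : ¬ CompM N (N + 1) p := fun hc => by
          rw [(hget p hpN).mpr hc] at hcompf
          simp at hcompf
        have hprime : p.Prime := by
          by_contra hnp
          exact hnc ((compM_full (by omega) hpN).mpr hnp)
        exact ⟨p, hpN, hprime, by omega, hv⟩
      · rintro ⟨p, hpN, hprime, hodd, rfl⟩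
        have hp3 : 3 ≤ p := by have := hprime.two_le; omega
        have hnc : ¬ CompM N (N + 1) p := fun hc =>
          (compM_full (by omega) hpN).mp hc hprime
        have hcompf : comp.getD p false = false := by
          rcases hcb : comp.getD p false
          · rfl
          · exact absurd ((hget p hpN).mp hcb) hnc
        refine ⟨?_, ?_⟩
        · rw [PySem.List.mem_pyRange_iff_of_pos (by norm_num)]
          refine ⟨by omega, by omega, by omega⟩
        · rw [PySem.List.pyGetD_natCast, hcompf]
          rfl
  rw [hL]
  exact PySem.Set.ofList_eq_self_of_nodup _ (hcanon_sorted.imp ne_of_lt)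

-- ========== assembly ==========

theorem func_eq_alt (n : Int) : func n = func_alt n := by
  rcases lt_or_ge n 2 with hn | hn
  · rw [func_eq, func_alt_eq]
    have h2' : PySem.List.pyRange 2 (n + 1) 1 = [] :=
      PySem.List.pyRange_one_eq_nil (by omega)
    have h3 : PySem.List.pyRange 3 (n + 1) 2 = [] := by
      rw [PySem.List.pyRange_of_pos _ _ (by norm_num), if_neg (by omega)]
      simp
    rw [h2', h3]
    rfl
  · have hN : n = ((n.toNat : Nat) : Int) := (Int.toNat_of_nonneg (by omega)).symm
    rw [hN, funcA_canon _ (by omega), funcB_canon _ (by omega)]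


-- ===== VERDICT (by name: the statement is the Claim_ definition above) =====
theorem func_spec : Claim_equal_func := by
  intro n _
  unfold Spec_func
  exact func_eq_alt n
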